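-- pv_equiv track=rewrite | github.com/chinhle23-zz/w2-mystery-word-faxedexcel | demon_words.py | demon_list
-- ===== SOURCE A (Python) =====
-- def demon_list(guess_list, remain_list):
--     possible_words = []
--     i = 0
--     while i < len(remain_list):
--         word = []
--         for letter in remain_list[i]:
--             if letter in guess_list:
--                 word.append(letter)
--             else:
--                 word.append("_")
--         possible_words.append(" ".join(word))
--         i += 1
--     zipped_list = list(zip(possible_words, remain_list))
--
--     distinct_list = []
--     i = 0
--     while i < len(zipped_list):
--         for word in zipped_list[i]:
--             if zipped_list[i][0] not in distinct_list:
--                 distinct_list.append(zipped_list[i][0])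
--         i += 1
--
--     occurence_list = []
--     for word in (distinct_list):
--         counter = 0
--         i = 0
--         while i < len(zipped_list):
--             if word == zipped_list[i][0]:
--                 counter += 1
--             i += 1
--         occurence_list.append([word, counter])
--
--     i = 0
--     max_occurence = occurence_list[0][1]
--     while i < len(occurence_list):
--         if occurence_list[i][1] > max_occurence:
--             max_occurence = occurence_list[i][1]
--         i += 1
--
--     demon_word = ""
--     i = 0
--     while i < len(occurence_list):
--         if occurence_list[i][1] == max_occurence:
--             demon_word = occurence_list[i][0]
--         i += 1
--
--     cheat_list = []
--     i = 0
--     while i < len(zipped_list):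
--         if zipped_list[i][0] == demon_word:
--             cheat_list.append(zipped_list[i][1])
--         i += 1
--
--
--     return cheat_list
-- ===== SOURCE B (Python) =====
-- def demon_list(guess_list, remain_list):
--     guesses = set(guess_list)
--     masks = [" ".join(c if c in guesses else "_" for c in w) for w in remain_list]
--     counts = {}
--     for m in masks:
--         counts[m] = counts.get(m, 0) + 1
--     best = max(counts.values())
--     demon = None
--     for m, c in counts.items():
--         if c == best:
--             demon = m
--     return [w for m, w in zip(masks, remain_list) if m == demon]
-- ===== Notes on version B (the rewrite author's own statement) =====
-- stated objective: faster
-- what changed: B builds each guess-mask once, counts mask occurrences in a single pass with an insertion-ordered dict and picks the last max-count mask, instead of A's dedup-by-membership-scan plus one whole-list counting scan per distinct mask.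
import Mathlib
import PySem

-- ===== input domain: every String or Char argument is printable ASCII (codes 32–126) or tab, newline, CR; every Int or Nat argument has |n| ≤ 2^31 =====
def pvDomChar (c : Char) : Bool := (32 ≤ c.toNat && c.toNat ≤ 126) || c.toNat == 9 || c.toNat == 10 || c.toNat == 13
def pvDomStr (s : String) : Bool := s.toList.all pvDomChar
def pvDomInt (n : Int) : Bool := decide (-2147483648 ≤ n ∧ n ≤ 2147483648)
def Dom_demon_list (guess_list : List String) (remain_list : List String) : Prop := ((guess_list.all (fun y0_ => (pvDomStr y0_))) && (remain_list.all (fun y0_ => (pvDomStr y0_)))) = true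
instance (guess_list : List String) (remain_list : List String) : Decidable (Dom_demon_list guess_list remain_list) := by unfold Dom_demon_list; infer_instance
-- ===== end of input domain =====

-- B replaces A's repeated whole-list counting and membership scans by one ordered counting
-- dict over the mask strings, then picks the last mask with the maximal count.

-- ===== PORT A =====
def demon_list (guess_list : List String) (remain_list : List String) : List String :=
  let possible_words := remain_list.foldl (fun pw w =>
    pw ++ [PySem.Str.join " " (w.toList.foldl (fun word c =>
      word ++ [if String.mk [c] ∈ guess_list then String.mk [c] else "_"]) [])]) []
  let zipped_list := possible_words.zip remain_list
  let distinct_list := zipped_list.foldl (fun dl p =>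
    [p.1, p.2].foldl (fun dl' _ => if p.1 ∉ dl' then dl' ++ [p.1] else dl') dl) []
  let occurence_list := distinct_list.foldl (fun ol w =>
    ol ++ [(w, zipped_list.foldl (fun c p => if w = p.1 then c + 1 else c) (0 : Int))]) []
  let max_occurence := occurence_list.foldl (fun m p => if p.2 > m then p.2 else m)
    ((occurence_list.headD ("", 0)).2)
  let demon_word := occurence_list.foldl (fun d p => if p.2 = max_occurence then p.1 else d) ""
  zipped_list.foldl (fun cl p => if p.1 = demon_word then cl ++ [p.2] else cl) []

-- ===== PORT B =====
def demon_list_alt (guess_list : List String) (remain_list : List String) : List String :=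
  let guesses := PySem.Set.ofList guess_list
  let masks := remain_list.map (fun w =>
    PySem.Str.join " " (w.toList.map (fun c =>
      if String.mk [c] ∈ guesses then String.mk [c] else "_")))
  let counts := masks.foldl (fun d m => d.insert m (d.getD m 0 + 1))
    (PySem.Dict.empty : PySem.Dict String Int)
  match PySem.List.max? counts.values (fun v => v) with
  | none => []  -- unreachable under Pre_ (Python's max() raises there too)
  | some best =>
    let demon := counts.items.foldl
      (fun d p => if p.2 = best then some p.1 else d) (none : Option String)
    (masks.zip remain_list).filterMap (fun p => if some p.1 = demon then some p.2 else none)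

-- ===== PRECONDITION & SPEC =====
-- A evaluates occurence_list[0][1]: on remain_list = [] it raises IndexError (B's max() raises too).
def Pre_demon_list (guess_list : List String) (remain_list : List String) : Prop :=
  remain_list ≠ []
instance (guess_list : List String) (remain_list : List String) : Decidable (Pre_demon_list guess_list remain_list) := by unfold Pre_demon_list; infer_instance

def pvWitness_demon_list : List String × List String := (["a"], ["ab", "ac", "bd"])

def Spec_demon_list (guess_list : List String) (remain_list : List String) (out : List String) : Prop := out = demon_list_alt guess_list remain_list
instance (guess_list : List String) (remain_list : List String) (out : List String) : Decidable (Spec_demon_list guess_list remain_list out) := by unfold Spec_demon_list; infer_instance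

-- ===== CLAIM (what is proved, stated in full; the proofs are below) =====
def Claim_equal_demon_list : Prop := ∀ (guess_list : List String) (remain_list : List String), Dom_demon_list guess_list remain_list → Pre_demon_list guess_list remain_list → Spec_demon_list guess_list remain_list (demon_list guess_list remain_list)

-- ===== LEMMAS AND PROOFS =====

theorem distinct_eq_ofList_fst (l : List (String × String)) (init : PySem.Set String) :
    l.foldl (fun dl p => [p.1, p.2].foldl (fun dl' _ => if p.1 ∉ dl' then dl' ++ [p.1] else dl') dl) init
      = l.foldl (fun dl p => PySem.Set.add dl p.1) init := by
  induction l generalizing init with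
  | nil => rfl
  | cons p t ih =>
    simp only [List.foldl_cons]
    rw [← ih]
    congr 1
    by_cases h : p.1 ∈ init <;> simp [PySem.Set.add, h]

theorem foldl_add_fst (l : List (String × String)) :
    l.foldl (fun dl p => PySem.Set.add dl p.1) ([] : List String)
      = PySem.Set.ofList (l.map Prod.fst) := by
  simp [PySem.Set.ofList, PySem.Set.empty, List.foldl_map]

theorem foldl_count_fst (w : String) (l : List (String × String)) (c : Int) :
    l.foldl (fun c p => if w = p.1 then c + 1 else c) c
      = c + ((l.map Prod.fst).count w : Int) := by
  induction l generalizing c with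
  | nil => simp
  | cons p t ih =>
    rw [List.foldl_cons, ih]
    by_cases h : w = p.1 <;> simp [List.count_cons, h, eq_comm] <;> push_cast <;> ring

theorem foldl_if_max (t : List Int) (m : Int) :
    t.foldl (fun m v => if v > m then v else m) m = t.foldl max m := by
  have hf : (fun (m v : Int) => if v > m then v else m) = (fun m v => max m v) := by
    funext m v
    by_cases h : v > m
    · simp [h, max_eq_right h.le]
    · simp [h, max_eq_left (not_lt.1 h)]
  rw [hf]

theorem max_fold_eq (l : List (String × Int)) (m0 : Int) :
    l.foldl (fun m p => if p.2 > m then p.2 else m) m0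
      = (l.map Prod.snd).foldl max m0 := by
  rw [← foldl_if_max, List.foldl_map]

theorem foldl_max_mem (t : List Int) (a : Int) : t.foldl max a ∈ a :: t := by
  induction t generalizing a with
  | nil => simp
  | cons b t ih =>
    have := ih (max a b)
    rcases List.mem_cons.1 this with h | h
    · rcases max_choice a b with h' | h' <;> simp_all
    · simp [List.foldl_cons, h]

theorem set_ofList_cons (x : String) (l : List String) :
    ∃ t, PySem.Set.ofList (x :: l) = x :: t := by
  suffices h : ∀ (l : List String) (s : List String), ∃ t, List.foldl PySem.Set.add s l = s ++ t by
    obtain ⟨t, ht⟩ := h l [x]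
    exact ⟨t, by simpa [PySem.Set.ofList, PySem.Set.empty, PySem.Set.add] using ht⟩
  intro l
  induction l with
  | nil => exact fun s => ⟨[], by simp⟩
  | cons y l ih =>
    intro s
    obtain ⟨t, ht⟩ := ih (PySem.Set.add s y)
    by_cases h : y ∈ s
    · have ha : PySem.Set.add s y = s := by simp [PySem.Set.add, h]
      rw [ha] at ht
      exact ⟨t, by rw [List.foldl_cons, ha]; exact ht⟩
    · have ha : PySem.Set.add s y = s ++ [y] := by simp [PySem.Set.add, h]
      rw [ha] at ht
      exact ⟨y :: t, by rw [List.foldl_cons, ha, ht]; simp⟩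

theorem pickA_none (M : Int) (l : List (String × Int)) (d : String)
    (h : ∀ p ∈ l, p.2 ≠ M) :
    l.foldl (fun d p => if p.2 = M then p.1 else d) d = d := by
  induction l generalizing d with
  | nil => rfl
  | cons p t ih =>
    rw [List.foldl_cons, if_neg (h p (by simp))]
    exact ih d (fun q hq => h q (List.mem_cons_of_mem p hq))

theorem pickB_none (M : Int) (l : List (String × Int)) (o : Option String)
    (h : ∀ p ∈ l, p.2 ≠ M) :
    l.foldl (fun o p => if p.2 = M then some p.1 else o) o = o := by
  induction l generalizing o with
  | nil => rfl
  | cons p t ih =>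
    rw [List.foldl_cons, if_neg (h p (by simp))]
    exact ih o (fun q hq => h q (List.mem_cons_of_mem p hq))

theorem pick_eq (M : Int) (l : List (String × Int)) (d : String) (o : Option String)
    (h : ∃ p ∈ l, p.2 = M) :
    l.foldl (fun o p => if p.2 = M then some p.1 else o) o
      = some (l.foldl (fun d p => if p.2 = M then p.1 else d) d) := by
  induction l generalizing d o with
  | nil => simp at h
  | cons p t ih =>
    by_cases hp : p.2 = M
    · simp only [List.foldl_cons, if_pos hp]
      by_cases ht : ∃ q ∈ t, q.2 = M
      · exact ih _ _ ht
      · push_neg at ht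
        rw [pickA_none M t p.1 ht, pickB_none M t (some p.1) ht]
    · simp only [List.foldl_cons, if_neg hp]
      apply ih
      rcases h with ⟨q, hq, hqM⟩
      rcases List.mem_cons.1 hq with rfl | hq
      · exact absurd hqM hp
      · exact ⟨q, hq, hqM⟩

theorem foldl_filter_eq_filterMap (dw : String) (l : List (String × String)) (acc : List String) :
    l.foldl (fun cl p => if p.1 = dw then cl ++ [p.2] else cl) acc
      = acc ++ l.filterMap (fun p => if p.1 = dw then some p.2 else none) := by
  induction l generalizing acc with
  | nil => simp
  | cons p t ih => by_cases h : p.1 = dw <;> simp [h, ih]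

theorem final_step (dw : String) (demon : Option String) (hd : demon = some dw)
    (l : List (String × String)) :
    l.foldl (fun cl p => if p.1 = dw then cl ++ [p.2] else cl) []
      = l.filterMap (fun p => if some p.1 = demon then some p.2 else none) := by
  subst hd
  rw [foldl_filter_eq_filterMap]
  simp

theorem tail_eq (ms r : List String) (hlen : ms.length = r.length) (hne : ms ≠ []) :
    (let zipped := ms.zip r
     let distinct := zipped.foldl (fun dl p =>
       [p.1, p.2].foldl (fun dl' _ => if p.1 ∉ dl' then dl' ++ [p.1] else dl') dl) []
     let occ := distinct.map (fun w =>
       (w, zipped.foldl (fun c p => if w = p.1 then c + 1 else c) (0 : Int)))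
     let mx := occ.foldl (fun m p => if p.2 > m then p.2 else m) ((occ.headD ("", 0)).2)
     let dw := occ.foldl (fun d p => if p.2 = mx then p.1 else d) ""
     zipped.foldl (fun cl p => if p.1 = dw then cl ++ [p.2] else cl) [])
    = (let counts := ms.foldl (fun d m => d.insert m (d.getD m 0 + 1))
         (PySem.Dict.empty : PySem.Dict String Int)
       match PySem.List.max? counts.values (fun v => v) with
       | none => []
       | some best =>
         let demon := counts.items.foldl
           (fun d p => if p.2 = best then some p.1 else d) (none : Option String)
         (ms.zip r).filterMap (fun p => if some p.1 = demon then some p.2 else none)) := by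
  obtain ⟨m0, mt, rfl⟩ := List.exists_cons_of_ne_nil hne
  simp only [distinct_eq_ofList_fst, foldl_add_fst, foldl_count_fst, zero_add,
    List.map_fst_zip (le_of_eq hlen),
    PySem.Dict.foldl_insert_getD_add_one_eq_counter, PySem.Dict.values,
    PySem.Dict.items_counter, List.map_map]
  obtain ⟨ds, hds⟩ := set_ofList_cons m0 mt
  simp only [hds, List.map_cons, List.headD_cons, Function.comp, max_fold_eq]
  rw [PySem.List.max?_id_cons]
  dsimp only
  simp only [List.map_map, Function.comp_def]
  have hmaxcollapse : ∀ (a : Int) (t : List Int),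
      List.foldl max a (a :: t) = List.foldl max a t := by
    intro a t; rw [List.foldl_cons, max_self]
  simp only [hmaxcollapse]
  have hmem := foldl_max_mem
    (List.map (fun x => ((List.count x (m0 :: mt) : Int))) ds)
    ((List.count m0 (m0 :: mt) : Int))
  have hex : ∃ p ∈ ((m0, (List.count m0 (m0 :: mt) : Int)) ::
      List.map (fun x => (x, (List.count x (m0 :: mt) : Int))) ds),
      p.2 = List.foldl max ((List.count m0 (m0 :: mt) : Int))
        (List.map (fun x => ((List.count x (m0 :: mt) : Int))) ds) := by
    rcases List.mem_cons.1 hmem with h | h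
    · exact ⟨(m0, (List.count m0 (m0 :: mt) : Int)), by simp, h.symm⟩
    · obtain ⟨x, hx, hxe⟩ := List.mem_map.1 h
      exact ⟨(x, (List.count x (m0 :: mt) : Int)),
        List.mem_cons_of_mem _ (List.mem_map_of_mem hx), hxe⟩
  exact final_step _ _ (pick_eq _ _ "" none hex) _

theorem demon_eq (g r : List String) (hpre : r ≠ []) : demon_list g r = demon_list_alt g r := by
  simp only [demon_list, demon_list_alt, PySem.Set.mem_ofList,
    PySem.List.foldl_append_singleton_eq_map, List.nil_append]
  refine tail_eq _ _ ?_ ?_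
  · simp
  · exact fun h => hpre (List.map_eq_nil_iff.mp h)

-- ===== VERDICT (by name: the statement is the Claim_ definition above) =====
theorem demon_list_spec : Claim_equal_demon_list := by
  intro g r _ hpre
  unfold Spec_demon_list
  exact demon_eq g r hpre
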